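-- pv_equiv track=rewrite | github.com/sajivfrancis777/IAO-Architecture | scripts/gen_testing_report.py | _build_defect_summary
-- ===== SOURCE A (Python) =====
-- def _build_defect_summary(defects: list[dict]) -> dict:
--     """Build defect summary metrics from a list of raw defects."""
--     _RESOLVED = {"Closed", "Done", "Resolved", "Verified", "Won't Fix", "Duplicate"}
--     _IN_PROGRESS = {"In Progress", "In Review", "In Development"}
--     total = len(defects)
--     resolved = sum(1 for d in defects if d.get("status", "") in _RESOLVED)
--     in_progress = sum(1 for d in defects if d.get("status", "") in _IN_PROGRESS)
--     open_count = total - resolved - in_progress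
--     critical = sum(1 for d in defects
--                    if (d.get("severity", "") or d.get("priority", "")).lower()
--                    in ("critical", "blocker", "1-critical", "s1"))
--     return {
--         "total": total,
--         "open": open_count,
--         "in_progress": in_progress,
--         "resolved": resolved,
--         "critical": critical,
--     }
-- ===== SOURCE B (Python) =====
-- def _build_defect_summary(defects: list[dict]) -> dict:
--     """Build defect summary metrics in a single pass with counters."""
--     resolved = in_progress = critical = 0
--     for d in defects:
--         st = d.get("status", "")
--         if st in ("Closed", "Done", "Resolved", "Verified", "Won't Fix", "Duplicate"):
--             resolved += 1
--         elif st in ("In Progress", "In Review", "In Development"):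
--             in_progress += 1
--         if (d.get("severity", "") or d.get("priority", "")).lower() in ("critical", "blocker", "1-critical", "s1"):
--             critical += 1
--     total = len(defects)
--     return {
--         "total": total,
--         "open": total - resolved - in_progress,
--         "in_progress": in_progress,
--         "resolved": resolved,
--         "critical": critical,
--     }
-- ===== Notes on version B (the rewrite author's own statement) =====
-- stated objective: alternative
-- what changed: Replaced A's three separate counting passes (three sum-generator scans over the defect list) with a single loop maintaining resolved/in_progress/critical counters, classifying each defect once with if/elif on its status.
import Mathlib
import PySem

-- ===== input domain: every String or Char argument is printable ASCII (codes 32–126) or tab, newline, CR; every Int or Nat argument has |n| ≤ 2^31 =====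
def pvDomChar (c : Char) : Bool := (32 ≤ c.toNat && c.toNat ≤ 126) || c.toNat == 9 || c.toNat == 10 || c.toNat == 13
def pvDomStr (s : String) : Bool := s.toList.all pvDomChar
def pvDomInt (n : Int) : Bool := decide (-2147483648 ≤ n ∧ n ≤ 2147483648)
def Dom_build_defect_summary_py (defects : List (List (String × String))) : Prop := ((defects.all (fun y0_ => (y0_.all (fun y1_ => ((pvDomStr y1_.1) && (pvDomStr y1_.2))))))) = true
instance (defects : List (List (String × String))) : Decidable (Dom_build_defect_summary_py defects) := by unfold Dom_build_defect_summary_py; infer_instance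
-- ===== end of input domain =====

-- ===== PORT A =====
-- B replaces A's three separate counting passes with one loop over the defects maintaining three counters (objective: alternative decomposition, same asymptotic cost).
-- shared helpers: the dict lookups and membership tests both Pythons perform verbatim
def pvGet (d : List (String × String)) (k dflt : String) : String :=
  ((d.find? (fun p => p.1 == k)).map (·.2)).getD dflt

def isResolvedD (d : List (String × String)) : Bool :=
  ["Closed", "Done", "Resolved", "Verified", "Won't Fix", "Duplicate"].contains (pvGet d "status" "")

def isInProgressD (d : List (String × String)) : Bool :=
  ["In Progress", "In Review", "In Development"].contains (pvGet d "status" "")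

def isCriticalD (d : List (String × String)) : Bool :=
  let s := pvGet d "severity" ""
  let s := if s = "" then pvGet d "priority" "" else s
  ["critical", "blocker", "1-critical", "s1"].contains (PySem.Str.lower s)

def build_defect_summary_py (defects : List (List (String × String))) : List (String × Int) :=
  let total : Int := defects.length
  let resolved : Int := defects.foldl (fun acc d => if isResolvedD d then acc + 1 else acc) 0
  let in_progress : Int := defects.foldl (fun acc d => if isInProgressD d then acc + 1 else acc) 0
  let open_count : Int := total - resolved - in_progress
  let critical : Int := defects.foldl (fun acc d => if isCriticalD d then acc + 1 else acc) 0
  [("total", total), ("open", open_count), ("in_progress", in_progress),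
   ("resolved", resolved), ("critical", critical)]

-- ===== PORT B =====
def build_defect_summary_py_alt (defects : List (List (String × String))) : List (String × Int) :=
  let s := defects.foldl
    (fun (st : Int × Int × Int) d =>
      let st1 := if isResolvedD d then (st.1 + 1, st.2.1, st.2.2)
                 else if isInProgressD d then (st.1, st.2.1 + 1, st.2.2)
                 else st
      if isCriticalD d then (st1.1, st1.2.1, st1.2.2 + 1) else st1)
    ((0 : Int), (0 : Int), (0 : Int))
  let total : Int := defects.length
  [("total", total), ("open", total - s.1 - s.2.1), ("in_progress", s.2.1),
   ("resolved", s.1), ("critical", s.2.2)]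

-- ===== PRECONDITION & SPEC =====
def Spec_build_defect_summary_py (defects : List (List (String × String))) (out : List (String × Int)) : Prop := out = build_defect_summary_py_alt defects
instance (defects : List (List (String × String))) (out : List (String × Int)) : Decidable (Spec_build_defect_summary_py defects out) := by unfold Spec_build_defect_summary_py; infer_instance

-- ===== CLAIM (what is proved, stated in full; the proofs are below) =====
def Claim_equal_build_defect_summary_py : Prop := ∀ (defects : List (List (String × String))), Dom_build_defect_summary_py defects → Spec_build_defect_summary_py defects (build_defect_summary_py defects)

-- ===== LEMMAS AND PROOFS =====
-- the resolved and in-progress status sets are disjoint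
theorem resolved_not_in_progress (d : List (String × String)) :
    isResolvedD d = true → isInProgressD d = false := by
  unfold isResolvedD isInProgressD
  generalize pvGet d "status" "" = s
  simp only [List.contains_eq_mem, decide_eq_true_eq, decide_eq_false_iff_not,
    List.mem_cons, List.not_mem_nil, or_false]
  rintro (rfl | rfl | rfl | rfl | rfl | rfl) <;> decide

-- B's single fold computes the triple of A's three folds
theorem fold_triple (l : List (List (String × String))) (r p c : Int) :
    l.foldl
      (fun (st : Int × Int × Int) d =>
        let st1 := if isResolvedD d then (st.1 + 1, st.2.1, st.2.2)
                   else if isInProgressD d then (st.1, st.2.1 + 1, st.2.2)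
                   else st
        if isCriticalD d then (st1.1, st1.2.1, st1.2.2 + 1) else st1)
      (r, p, c)
    = (l.foldl (fun acc d => if isResolvedD d then acc + 1 else acc) r,
       l.foldl (fun acc d => if isInProgressD d then acc + 1 else acc) p,
       l.foldl (fun acc d => if isCriticalD d then acc + 1 else acc) c) := by
  induction l generalizing r p c with
  | nil => rfl
  | cons d t ih =>
    simp only [List.foldl_cons]
    rw [← ih]
    congr 1
    by_cases hr : isResolvedD d = true
    · have hp := resolved_not_in_progress d hr
      by_cases hc : isCriticalD d = true <;> simp [hr, hp, hc]
    · by_cases hp : isInProgressD d = true <;>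
        by_cases hc : isCriticalD d = true <;>
        simp [hr, hp, hc]

-- ===== VERDICT (by name: the statement is the Claim_ definition above) =====
theorem build_defect_summary_py_spec : Claim_equal_build_defect_summary_py := by
  intro defects _
  unfold Spec_build_defect_summary_py build_defect_summary_py build_defect_summary_py_alt
  rw [fold_triple]
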